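-- pv_equiv track=rewrite | github.com/garobed1/pou-paper-code | utils/sutils.py | divide_cases
-- ===== SOURCE A (Python) =====
-- def divide_cases(ncases, nprocs):
--     """
--     From parallel OpenMDAO beam problem example
--
--     Divide up adaptive sampling runs among available procs.
--
--     Parameters
--     ----------
--     ncases : int
--         Number of load cases.
--     nprocs : int
--         Number of processors.
--
--     Returns
--     -------
--     list of list of int
--         Integer case numbers for each proc.
--     """
--     data = []
--     for j in range(nprocs):
--         data.append([])
--
--     wrap = 0
--     for j in range(ncases):
--         idx = j - wrap
--         if idx >= nprocs:
--             idx = 0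
--             wrap = j
--
--         data[idx].append(j)
--
--     return data
-- ===== SOURCE B (Python) =====
-- def divide_cases(ncases, nprocs):
--     """Round-robin distribution: build each processor's case list directly
--     as a stride through the cases, instead of dispatching case by case."""
--     return [list(range(p, ncases, nprocs)) for p in range(nprocs)]
-- ===== Notes on version B (the rewrite author's own statement) =====
-- stated objective: simpler
-- what changed: Instead of A's single dispatch pass over all cases with a hand-maintained wrap counter, B loops over processors and builds each processor's list directly as a stride range(p, ncases, nprocs).
import Mathlib
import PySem

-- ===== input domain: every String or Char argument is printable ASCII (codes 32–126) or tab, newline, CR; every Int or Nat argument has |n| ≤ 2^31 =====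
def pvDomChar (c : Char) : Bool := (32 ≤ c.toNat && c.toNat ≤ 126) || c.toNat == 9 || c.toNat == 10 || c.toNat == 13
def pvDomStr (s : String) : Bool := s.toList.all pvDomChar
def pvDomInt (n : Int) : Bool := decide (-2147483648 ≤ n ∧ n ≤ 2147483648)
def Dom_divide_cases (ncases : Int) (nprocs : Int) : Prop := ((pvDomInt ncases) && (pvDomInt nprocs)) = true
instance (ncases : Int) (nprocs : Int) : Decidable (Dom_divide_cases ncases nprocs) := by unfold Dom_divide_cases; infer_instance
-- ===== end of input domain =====

-- B builds each processor's list directly as a stride range(p, ncases, nprocs) instead of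
-- A's dispatch pass over all cases with a wrap counter (objective: simpler).


-- ===== PORT A =====
-- loop body of A's 'for j in range(ncases)' loop; 'data[idx].append(j)' is ported as
-- get-then-set at idx (pyGetD/pySetD are exact at in-range indices, which Pre_ guarantees;
-- at the excluded inputs Python raises IndexError there)
def dcStep (nprocs : Int) (s : List (List Int) × Int) (j : Int) : List (List Int) × Int :=
  let idx := j - s.2
  let iw := if idx ≥ nprocs then ((0 : Int), j) else (idx, s.2)
  (PySem.List.pySetD s.1 iw.1 (PySem.List.pyGetD s.1 iw.1 [] ++ [j]), iw.2)

def divide_cases (ncases : Int) (nprocs : Int) : List (List Int) :=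
  let data := (PySem.List.pyRange 0 nprocs 1).foldl (fun d _ => d ++ [([] : List Int)]) []
  ((PySem.List.pyRange 0 ncases 1).foldl (dcStep nprocs) (data, 0)).1

-- ===== PORT B =====
def divide_cases_alt (ncases : Int) (nprocs : Int) : List (List Int) :=
  (PySem.List.pyRange 0 nprocs 1).map (fun p => PySem.List.pyRange p ncases nprocs)

-- ===== PRECONDITION & SPEC =====
-- A raises IndexError (data[0] with no processor lists) exactly when nprocs <= 0 and ncases >= 1;
-- Pre_ excludes only those inputs. Everywhere A returns, the claim applies.
def Pre_divide_cases (ncases : Int) (nprocs : Int) : Prop := 1 ≤ nprocs ∨ ncases ≤ 0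
instance (ncases : Int) (nprocs : Int) : Decidable (Pre_divide_cases ncases nprocs) := by unfold Pre_divide_cases; infer_instance
def pvWitness_divide_cases : Int × Int := (7, 3)

def Spec_divide_cases (ncases : Int) (nprocs : Int) (out : List (List Int)) : Prop := out = divide_cases_alt ncases nprocs
instance (ncases : Int) (nprocs : Int) (out : List (List Int)) : Decidable (Spec_divide_cases ncases nprocs out) := by unfold Spec_divide_cases; infer_instance

-- ===== CLAIM (what is proved, stated in full; the proofs are below) =====
def Claim_equal_divide_cases : Prop := ∀ (ncases : Int) (nprocs : Int), Dom_divide_cases ncases nprocs → Pre_divide_cases ncases nprocs → Spec_divide_cases ncases nprocs (divide_cases ncases nprocs)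

-- ===== LEMMAS AND PROOFS =====

-- A's first loop appends one empty list per processor
theorem foldl_append_empty (l : List Int) (init : List (List Int)) :
    l.foldl (fun d _ => d ++ [([] : List Int)]) init = init ++ l.map (fun _ => ([] : List Int)) := by
  induction l generalizing init with
  | nil => simp
  | cons x xs ih => simp [List.foldl_cons, ih]

-- B's stride range is the filter of the full case range by residue mod nprocs
theorem stride_eq_filter (k p ncases : Int) (hk : 0 < k) (hp0 : 0 ≤ p) (hpk : p < k) :
    PySem.List.pyRange p ncases k
      = (PySem.List.pyRange 0 ncases 1).filter (fun j => PySem.Int.mod j k = p) := by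
  have hs1 : List.Pairwise (· < ·) (PySem.List.pyRange p ncases k) := by
    rw [PySem.List.pyRange_of_pos p ncases hk]
    refine List.Pairwise.map _ ?_ (List.pairwise_lt_range)
    intro a b hab
    have : (a:Int) < b := by exact_mod_cast hab
    nlinarith
  have hs2 : List.Pairwise (· < ·)
      ((PySem.List.pyRange 0 ncases 1).filter (fun j => PySem.Int.mod j k = p)) :=
    List.Pairwise.filter _ (PySem.List.pairwise_lt_pyRange_one 0 ncases)
  have hmem : ∀ x : Int, x ∈ PySem.List.pyRange p ncases k ↔
      x ∈ (PySem.List.pyRange 0 ncases 1).filter (fun j => PySem.Int.mod j k = p) := by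
    intro x
    rw [PySem.List.mem_pyRange_iff_of_pos hk, List.mem_filter]
    simp only [PySem.List.mem_pyRange_one, PySem.Int.mod_eq_emod_of_pos hk, decide_eq_true_eq]
    constructor
    · rintro ⟨h1, h2, h3⟩
      refine ⟨⟨by omega, h2⟩, ?_⟩
      have : x % k = p % k := by
        rw [Int.emod_eq_emod_iff_emod_sub_eq_zero]
        exact Int.emod_eq_zero_of_dvd h3
      rw [this, Int.emod_eq_of_lt hp0 hpk]
    · rintro ⟨⟨h0, h2⟩, h3⟩
      have hd : k ∣ x - p := by
        apply Int.dvd_of_emod_eq_zero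
        rw [← Int.emod_eq_emod_iff_emod_sub_eq_zero, h3, Int.emod_eq_of_lt hp0 hpk]
      have hq : 0 ≤ x / k := Int.ediv_nonneg h0 (le_of_lt hk)
      have hkq : 0 ≤ k * (x / k) := mul_nonneg (le_of_lt hk) hq
      have hxd : x % k = x - k * (x / k) := by rw [Int.emod_def]
      have hple : p ≤ x := by rw [← h3]; omega
      exact ⟨hple, h2, hd⟩
  have hnd1 : (PySem.List.pyRange p ncases k).Nodup := hs1.nodup
  have hnd2 : ((PySem.List.pyRange 0 ncases 1).filter (fun j => PySem.Int.mod j k = p)).Nodup :=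
    hs2.nodup
  exact ((List.perm_ext_iff_of_nodup hnd1 hnd2).mpr hmem).eq_of_pairwise
    (fun a b _ _ h1 h2 => absurd h2 (not_lt.mpr (le_of_lt h1))) hs1 hs2

-- wrap value maintained by A's loop after processing cases 0..n-1
def wrapVal (k n : Int) : Int := if n = 0 then 0 else k * ((n - 1) / k)

-- the branch of A's loop computes the residue of the current case index
theorem dc_idx_eq (k n : Int) (hk : 0 < k) (hn : 0 ≤ n) :
    (if n - (if n = 0 then (0:Int) else k * ((n - 1) / k)) ≥ k then (0:Int)
     else n - (if n = 0 then (0:Int) else k * ((n - 1) / k))) = n % k := by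
  by_cases h0 : n = 0
  · subst h0; rw [if_pos rfl, if_neg (by omega)]; simp
  · have hmod : k * ((n-1)/k) + (n-1) % k = n - 1 := Int.ediv_add_emod (n-1) k
    have hr0 : 0 ≤ (n-1) % k := Int.emod_nonneg _ (ne_of_gt hk)
    have hrk : (n-1) % k < k := Int.emod_lt_of_pos _ hk
    have hne : n = ((n-1) % k + 1) + k * ((n-1)/k) := by omega
    have hm : n % k = ((n-1) % k + 1) % k := by
      conv_lhs => rw [hne]
      rw [Int.add_mul_emod_self_left]
    rw [if_neg h0]
    by_cases hc : n - k * ((n-1)/k) ≥ k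
    · rw [if_pos hc, hm]
      have : (n-1) % k + 1 = k := by omega
      rw [this, Int.emod_self]
    · rw [if_neg hc, hm, Int.emod_eq_of_lt (by omega) (by omega)]
      omega

-- the wrap variable after the branch is the largest multiple of nprocs ≤ the case index
theorem dc_wrap_eq (k n : Int) (hk : 0 < k) (hn : 0 ≤ n) :
    (if n - (if n = 0 then (0:Int) else k * ((n - 1) / k)) ≥ k then n
     else (if n = 0 then (0:Int) else k * ((n - 1) / k))) = k * (n / k) := by
  by_cases h0 : n = 0
  · subst h0; rw [if_pos rfl, if_neg (by omega)]; simp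
  · have hmod : k * ((n-1)/k) + (n-1) % k = n - 1 := Int.ediv_add_emod (n-1) k
    have hr0 : 0 ≤ (n-1) % k := Int.emod_nonneg _ (ne_of_gt hk)
    have hrk : (n-1) % k < k := Int.emod_lt_of_pos _ hk
    have hne : n = ((n-1) % k + 1) + k * ((n-1)/k) := by omega
    have hdiv : n / k = ((n-1) % k + 1) / k + (n-1)/k := by
      conv_lhs => rw [hne]
      rw [Int.add_mul_ediv_left _ _ (ne_of_gt hk)]
    rw [if_neg h0]
    by_cases hc : n - k * ((n-1)/k) ≥ k
    · rw [if_pos hc, hdiv]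
      have h1 : (n-1) % k + 1 = k := by omega
      rw [h1, Int.ediv_self (ne_of_gt hk), mul_add, mul_one]
      omega
    · rw [if_neg hc, hdiv]
      have h1 : ((n-1) % k + 1) / k = 0 := Int.ediv_eq_zero_of_lt (by omega) (by omega)
      rw [h1, zero_add]

-- appending to the row at an in-range index of a mapped range
theorem set_map_pyRange (k : Int) (_hk : 0 < k) (f : Int → List Int) (m : Int)
    (hm0 : 0 ≤ m) (_hmk : m < k) (x : Int) :
    ((PySem.List.pyRange 0 k 1).map f).set m.toNat (f m ++ [x])
      = (PySem.List.pyRange 0 k 1).map (fun p => f p ++ if p = m then [x] else []) := by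
  apply List.ext_getElem
  · simp
  · intro i h1 h2
    simp only [List.length_set, List.length_map, PySem.List.length_pyRange_one] at h1
    have hl : i < (PySem.List.pyRange 0 k 1).length := by
      rw [PySem.List.length_pyRange_one]; omega
    rw [List.getElem_set, List.getElem_map, List.getElem_map,
        PySem.List.getElem_pyRange_one 0 k i hl]
    by_cases he : m.toNat = i
    · rw [if_pos he]
      have : (0:Int) + (i:Int) = m := by omega
      rw [this, if_pos rfl]
    · rw [if_neg he, if_neg (by omega : ¬((0:Int) + (i:Int) = m))]
      simp

-- main invariant of A's dispatch loop: after cases 0..n-1, row p holds exactly the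
-- processed cases with residue p, and wrap is as in wrapVal
theorem dc_invariant (k : Int) (hk : 0 < k) (n : Nat) :
    (PySem.List.pyRange 0 (n : Int) 1).foldl (dcStep k)
        ((PySem.List.pyRange 0 k 1).map (fun _ => ([] : List Int)), 0)
      = ((PySem.List.pyRange 0 k 1).map
           (fun p => (PySem.List.pyRange 0 (n : Int) 1).filter (fun j => PySem.Int.mod j k = p)),
         wrapVal k (n : Int)) := by
  induction n with
  | zero =>
    simp [PySem.List.pyRange_one_eq_nil (le_refl (0:Int)), wrapVal]
  | succ n ih =>
    have hc : ((n+1 : Nat) : Int) = (n : Int) + 1 := by push_cast; ring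
    rw [hc, PySem.List.pyRange_one_succ_right (by positivity), List.foldl_append, ih]
    simp only [List.foldl_cons, List.foldl_nil]
    set l := PySem.List.pyRange 0 k 1 with hl
    set f := fun p => (PySem.List.pyRange 0 (n : Int) 1).filter (fun j => PySem.Int.mod j k = p) with hf
    have hm0 : 0 ≤ (n : Int) % k := Int.emod_nonneg _ (ne_of_gt hk)
    have hmk : (n : Int) % k < k := Int.emod_lt_of_pos _ hk
    have hidx := dc_idx_eq k (n : Int) hk (by positivity)
    have hwrap := dc_wrap_eq k (n : Int) hk (by positivity)
    have hlen : ((l.map f).length : Int) = k := by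
      rw [List.length_map, hl, PySem.List.length_pyRange_one]; omega
    rw [dcStep]
    simp only [wrapVal] at hidx hwrap ⊢
    rw [apply_ite Prod.fst, apply_ite Prod.snd]
    simp only []
    rw [hidx, hwrap]
    have hget : PySem.List.pyGetD (l.map f) ((n : Int) % k) [] = f ((n : Int) % k) := by
      rw [PySem.List.pyGetD_eq_getElem _ _ hm0 (by omega), List.getElem_map]
      simp only [hl, PySem.List.getElem_pyRange_one]
      congr 1
      omega
    rw [PySem.List.pySetD_of_nonneg _ _ hm0, hget,
        set_map_pyRange k hk f ((n:Int) % k) hm0 hmk (n : Int)]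
    rw [Prod.mk.injEq]
    constructor
    · rw [← hl]
      apply List.map_congr_left
      intro p hp
      rw [List.filter_append]
      simp only [List.filter_cons, List.filter_nil]
      congr 1
      rw [PySem.Int.mod_eq_emod_of_pos hk]
      by_cases hpm : p = (n : Int) % k
      · simp [hpm]
      · rw [if_neg hpm, if_neg (by simp only [decide_eq_true_eq]; omega)]
    · rw [if_neg (by positivity : (n : Int) + 1 ≠ 0)]
      have h2 : (n : Int) + 1 - 1 = (n : Int) := by ring
      rw [h2]

-- ===== VERDICT (by name: the statement is the Claim_ definition above) =====
theorem divide_cases_spec : Claim_equal_divide_cases := by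
  intro ncases k _ hpre
  unfold Spec_divide_cases
  by_cases hk : 1 ≤ k
  · have hkpos : 0 < k := hk
    simp only [divide_cases, divide_cases_alt, foldl_append_empty, List.nil_append]
    have hcast : PySem.List.pyRange 0 ncases 1 = PySem.List.pyRange 0 (ncases.toNat : Int) 1 := by
      by_cases hnc : 0 ≤ ncases
      · rw [Int.toNat_of_nonneg hnc]
      · rw [PySem.List.pyRange_one_eq_nil (by omega), PySem.List.pyRange_one_eq_nil (by omega)]
    rw [hcast, dc_invariant k hkpos ncases.toNat]
    rw [← hcast]
    apply List.map_congr_left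
    intro p hp
    rw [PySem.List.mem_pyRange_one] at hp
    exact (stride_eq_filter k p ncases hkpos (by omega) (by omega)).symm
  · have hn : ncases ≤ 0 := by unfold Pre_divide_cases at hpre; omega
    simp [divide_cases, divide_cases_alt,
      PySem.List.pyRange_one_eq_nil (show ncases ≤ 0 from hn),
      PySem.List.pyRange_one_eq_nil (show k ≤ 0 by omega)]
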